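-- pv_equiv track=rewrite | github.com/jordenrsantos-sys/MTG-Deck | api/engine/decklist_resolve_v1.py | _sort_candidates
-- ===== SOURCE A (Python) =====
-- from typing import Any, Dict, Iterable, List, Tuple
--
-- def _nonempty_str(value: Any) -> str | None:
--     if isinstance(value, str):
--         token = value.strip()
--         if token != "":
--             return token
--     return None
--
-- def _sort_candidates(candidates: Iterable[Dict[str, str]]) -> List[Dict[str, str]]:
--     dedup: Dict[Tuple[str, str], Dict[str, str]] = {}
--     for candidate in candidates:
--         if not isinstance(candidate, dict):
--             continue
--         oracle_id = _nonempty_str(candidate.get("oracle_id"))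
--         name = _nonempty_str(candidate.get("name"))
--         if oracle_id is None or name is None:
--             continue
--         dedup[(oracle_id, name)] = {
--             "oracle_id": oracle_id,
--             "name": name,
--         }
--
--     return [
--         dedup[key]
--         for key in sorted(
--             dedup.keys(),
--             key=lambda item: (item[0], item[1].casefold(), item[1]),
--         )
--     ]
-- ===== SOURCE B (Python) =====
-- from typing import Any, Dict, Iterable, List, Tuple
--
-- def _nonempty_str(value: Any) -> str | None:
--     if isinstance(value, str):
--         token = value.strip()
--         if token != "":
--             return token
--     return None
--
-- def _sort_candidates(candidates: Iterable[Dict[str, str]]) -> List[Dict[str, str]]: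
--     keys: List[Tuple[str, str]] = []
--     for candidate in candidates:
--         if not isinstance(candidate, dict):
--             continue
--         oracle_id = _nonempty_str(candidate.get("oracle_id"))
--         name = _nonempty_str(candidate.get("name"))
--         if oracle_id is None or name is None:
--             continue
--         keys.append((oracle_id, name))
--
--     keys.sort(key=lambda item: (item[0], item[1].casefold(), item[1]))
--
--     out: List[Dict[str, str]] = []
--     prev: Tuple[str, str] | None = None
--     for key in keys:
--         if key != prev:
--             out.append({"oracle_id": key[0], "name": key[1]})
--             prev = key
--     return out
-- ===== Notes on version B (the rewrite author's own statement) =====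
-- stated objective: alternative
-- what changed: Replaces A's hash-table dedup (dict keyed by the (oracle_id, name) tuple) followed by sorting the dict keys with a single pass that collects the valid key tuples, sorts them once with the same key, and collapses adjacent duplicates while emitting the output dicts.
import Mathlib
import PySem

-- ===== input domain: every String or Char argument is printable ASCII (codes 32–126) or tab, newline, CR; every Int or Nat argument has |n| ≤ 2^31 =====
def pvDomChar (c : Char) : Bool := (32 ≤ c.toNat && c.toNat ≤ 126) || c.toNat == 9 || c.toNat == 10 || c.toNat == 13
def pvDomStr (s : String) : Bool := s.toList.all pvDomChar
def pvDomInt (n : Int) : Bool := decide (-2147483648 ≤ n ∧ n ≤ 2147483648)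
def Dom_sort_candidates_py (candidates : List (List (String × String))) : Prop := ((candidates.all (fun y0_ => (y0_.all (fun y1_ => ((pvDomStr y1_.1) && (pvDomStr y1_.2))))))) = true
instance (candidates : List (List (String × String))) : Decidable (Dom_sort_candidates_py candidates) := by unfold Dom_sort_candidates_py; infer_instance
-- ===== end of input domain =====

-- B replaces A's hash-table dedup followed by sorting the dict keys with collect-valid-keys,
-- sort once with the same key, then collapse adjacent duplicates (objective: alternative algorithm).
-- Shared helpers (identical code in both Pythons): _nonempty_str, the candidate-key extraction,
-- the sort key lambda, and the output-dict constructor.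

-- ===== PORT A =====
-- _nonempty_str(value) for value = candidate.get(k) : None or a str (dict values are str here)
def pyNonemptyStr (value : Option String) : Option String :=
  match value with
  | some s => let token := PySem.Str.strip s; if token = "" then none else some token
  | none => none

-- oracle_id/name extraction from a candidate dict (assoc list ported as dict, .get = Dict.get?);
-- returns the (oracle_id, name) pair iff both are non-empty after strip — the 'continue' tests of both loops
def pyCandKey (candidate : List (String × String)) : Option (String × String) :=
  match pyNonemptyStr ((PySem.Dict.ofList candidate).get? "oracle_id"),
        pyNonemptyStr ((PySem.Dict.ofList candidate).get? "name") with
  | some oracle_id, some name => some (oracle_id, name)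
  | _, _ => none

-- the dict literal {"oracle_id": ..., "name": ...}
def pyMkDict (k : String × String) : List (String × String) :=
  [("oracle_id", k.1), ("name", k.2)]

-- the sort key lambda item: (item[0], item[1].casefold(), item[1]); ported as a lexicographic
-- triple (Prod.Lex = Python tuple '<'); casefold = lower, exact on the ASCII domain Dom_
def pyKey (item : String × String) : Lex (String × Lex (String × String)) :=
  toLex (item.1, toLex (PySem.Str.lower item.2, item.2))

def sort_candidates_py (candidates : List (List (String × String))) : List (List (String × String)) :=
  let dedup : PySem.Dict (String × String) (List (String × String)) :=
    candidates.foldl (fun d candidate =>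
      match pyCandKey candidate with
      | some k => d.insert k (pyMkDict k)   -- dedup[(oracle_id, name)] = {...}
      | none => d) PySem.Dict.empty         -- the two 'continue's
  -- [dedup[key] for key in sorted(dedup.keys(), key=...)]; dedup[key] never raises (key ∈ keys), ported as getD
  (PySem.List.sorted dedup.keys pyKey).map (fun k => dedup.getD k [])

-- ===== PORT B =====
def sort_candidates_py_alt (candidates : List (List (String × String))) : List (List (String × String)) :=
  let keys : List (String × String) :=
    candidates.foldl (fun acc candidate =>
      match pyCandKey candidate with
      | some k => acc ++ [k]
      | none => acc) []
  let skeys := PySem.List.sorted keys pyKey   -- keys.sort(key=...), same key lambda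
  -- out/prev loop: append only when key != prev
  (skeys.foldl (fun (st : List (List (String × String)) × Option (String × String)) k =>
      if st.2 = some k then st else (st.1 ++ [pyMkDict k], some k))
    ([], none)).1

-- ===== PRECONDITION & SPEC =====
def Spec_sort_candidates_py (candidates : List (List (String × String))) (out : List (List (String × String))) : Prop := out = sort_candidates_py_alt candidates
instance (candidates : List (List (String × String))) (out : List (List (String × String))) : Decidable (Spec_sort_candidates_py candidates out) := by unfold Spec_sort_candidates_py; infer_instance

-- ===== CLAIM (what is proved, stated in full; the proofs are below) =====
def Claim_equal_sort_candidates_py : Prop := ∀ (candidates : List (List (String × String))), Dom_sort_candidates_py candidates → Spec_sort_candidates_py candidates (sort_candidates_py candidates)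

-- ===== LEMMAS AND PROOFS =====

theorem pyKey_inj {a b : String × String} (h : pyKey a = pyKey b) : a = b := by
  unfold pyKey at h
  have h' := congrArg (fun x => ofLex x) h
  simp only [ofLex_toLex, Prod.mk.injEq] at h'
  obtain ⟨h1, h2⟩ := h'
  have h2' := congrArg (fun x => ofLex x) h2
  simp only [ofLex_toLex, Prod.mk.injEq] at h2'
  exact Prod.ext h1 h2'.2

-- the adjacent-dedup pass of B, as a recursive function on the sorted list
def adjDedup : Option (String × String) → List (String × String) → List (String × String)
  | _, [] => []
  | prev, k :: t => if prev = some k then adjDedup prev t else k :: adjDedup (some k) t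

theorem foldB_eq (ys : List (String × String)) :
    ∀ (acc : List (List (String × String))) (prev : Option (String × String)),
    (ys.foldl (fun (st : List (List (String × String)) × Option (String × String)) k =>
        if st.2 = some k then st else (st.1 ++ [pyMkDict k], some k)) (acc, prev)).1
      = acc ++ (adjDedup prev ys).map pyMkDict := by
  induction ys with
  | nil => intro acc prev; simp [adjDedup]
  | cons k t ih =>
    intro acc prev
    by_cases h : prev = some k
    · simp [adjDedup, h, ih]
    · simp [adjDedup, h, ih, List.append_assoc]

theorem adjDedup_cons_eq {prev : Option (String × String)} {k : String × String}
    (h : prev = some k) (t : List (String × String)) :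
    adjDedup prev (k :: t) = adjDedup prev t := by
  rw [adjDedup, if_pos h]

theorem adjDedup_cons_ne {prev : Option (String × String)} {k : String × String}
    (h : ¬ prev = some k) (t : List (String × String)) :
    adjDedup prev (k :: t) = k :: adjDedup (some k) t := by
  rw [adjDedup, if_neg h]

theorem adjDedup_mem (ys : List (String × String)) :
    ∀ (prev : Option (String × String)),
    ys.Pairwise (fun a b => pyKey a ≤ pyKey b) →
    (∀ p, prev = some p → ∀ y ∈ ys, pyKey p ≤ pyKey y) →
    ∀ a, a ∈ adjDedup prev ys ↔ a ∈ ys ∧ prev ≠ some a := by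
  induction ys with
  | nil => intro prev _ _ a; simp [adjDedup]
  | cons x t ih =>
    intro prev hp hprev a
    have hx : ∀ y ∈ t, pyKey x ≤ pyKey y := fun y hy => (List.pairwise_cons.mp hp).1 y hy
    have ht : t.Pairwise (fun a b => pyKey a ≤ pyKey b) := (List.pairwise_cons.mp hp).2
    have hprevt : ∀ p, (some x : Option (String × String)) = some p → ∀ y ∈ t, pyKey p ≤ pyKey y := by
      intro p hp' y hy
      injection hp' with hp'; subst hp'; exact hx y hy
    by_cases h : prev = some x
    · subst h
      rw [adjDedup_cons_eq rfl, ih (some x) ht hprevt a]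
      constructor
      · rintro ⟨hat, hne⟩
        exact ⟨List.mem_cons_of_mem _ hat, hne⟩
      · rintro ⟨hacons, hne⟩
        rcases List.mem_cons.mp hacons with h1 | h1
        · exact absurd (congrArg some h1).symm hne
        · exact ⟨h1, hne⟩
    · rw [adjDedup_cons_ne h, List.mem_cons, ih (some x) ht hprevt a]
      constructor
      · rintro (h1 | ⟨hat, hne⟩)
        · subst h1; exact ⟨List.mem_cons_self, fun hc => h hc⟩
        · refine ⟨List.mem_cons_of_mem _ hat, ?_⟩
          rintro rfl
          have h1 : pyKey a ≤ pyKey x := hprev a rfl x List.mem_cons_self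
          have h2 : pyKey x ≤ pyKey a := hx a hat
          exact hne (congrArg some (pyKey_inj (le_antisymm h2 h1)))
      · rintro ⟨hacons, hne⟩
        rcases List.mem_cons.mp hacons with h1 | h1
        · exact Or.inl h1
        · by_cases hax : a = x
          · exact Or.inl hax
          · exact Or.inr ⟨h1, fun hc => hax (Option.some.inj hc).symm⟩

theorem adjDedup_pairwise (ys : List (String × String)) :
    ∀ (prev : Option (String × String)),
    ys.Pairwise (fun a b => pyKey a ≤ pyKey b) →
    (adjDedup prev ys).Pairwise (fun a b => pyKey a < pyKey b) := by
  induction ys with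
  | nil => intro prev _; simp [adjDedup]
  | cons x t ih =>
    intro prev hp
    have hx : ∀ y ∈ t, pyKey x ≤ pyKey y := fun y hy => (List.pairwise_cons.mp hp).1 y hy
    have ht : t.Pairwise (fun a b => pyKey a ≤ pyKey b) := (List.pairwise_cons.mp hp).2
    have hprevt : ∀ p, (some x : Option (String × String)) = some p → ∀ y ∈ t, pyKey p ≤ pyKey y := by
      intro p hp' y hy
      injection hp' with hp'; subst hp'; exact hx y hy
    by_cases h : prev = some x
    · rw [adjDedup_cons_eq h]; exact ih prev ht
    · rw [adjDedup_cons_ne h]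
      refine List.pairwise_cons.mpr ⟨?_, ih (some x) ht⟩
      intro b hb
      obtain ⟨hbt, hbne⟩ := (adjDedup_mem t (some x) ht hprevt b).mp hb
      have hle : pyKey x ≤ pyKey b := hx b hbt
      have hne : pyKey x ≠ pyKey b := fun hc => hbne (congrArg some (pyKey_inj hc))
      exact lt_of_le_of_ne hle hne

-- B's key-collecting loop is filterMap
theorem foldKeys_eq (cs : List (List (String × String))) :
    ∀ (acc : List (String × String)),
    (cs.foldl (fun acc candidate =>
      match pyCandKey candidate with
      | some k => acc ++ [k]
      | none => acc) acc) = acc ++ cs.filterMap pyCandKey := by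
  induction cs with
  | nil => intro acc; simp
  | cons c t ih =>
    intro acc
    cases h : pyCandKey c with
    | none => rw [List.foldl_cons]; simp only [h]; rw [ih acc, List.filterMap_cons_none h]
    | some k =>
      rw [List.foldl_cons]; simp only [h]
      rw [ih (acc ++ [k]), List.filterMap_cons_some h, List.append_assoc]
      rfl

-- A's dict-building fold
def foldA (cs : List (List (String × String)))
    (d : PySem.Dict (String × String) (List (String × String))) :
    PySem.Dict (String × String) (List (String × String)) :=
  cs.foldl (fun d candidate =>
    match pyCandKey candidate with
    | some k => d.insert k (pyMkDict k)
    | none => d) d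

theorem foldA_cons (c : List (String × String)) (t : List (List (String × String)))
    (d : PySem.Dict (String × String) (List (String × String))) :
    foldA (c :: t) d = foldA t (match pyCandKey c with
      | some k => d.insert k (pyMkDict k)
      | none => d) := rfl

theorem foldA_mem_keys (cs : List (List (String × String))) :
    ∀ d k, k ∈ (foldA cs d).keys ↔ k ∈ d.keys ∨ k ∈ cs.filterMap pyCandKey := by
  induction cs with
  | nil => intro d k; simp [foldA]
  | cons c t ih =>
    intro d k
    rw [foldA_cons]
    cases h : pyCandKey c with
    | none => rw [ih d k, List.filterMap_cons_none h]
    | some k' =>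
      rw [ih (d.insert k' (pyMkDict k')) k, List.filterMap_cons_some h,
        PySem.Dict.mem_keys_insert, List.mem_cons]
      tauto

theorem foldA_nodup (cs : List (List (String × String))) :
    ∀ d, d.keys.Nodup → (foldA cs d).keys.Nodup := by
  induction cs with
  | nil => intro d h; exact h
  | cons c t ih =>
    intro d h
    rw [foldA_cons]
    cases hc : pyCandKey c with
    | none => exact ih d h
    | some k =>
      exact ih (d.insert k (pyMkDict k)) (PySem.Dict.nodup_keys_insert d k (pyMkDict k) h)

theorem foldA_get? (cs : List (List (String × String))) :
    ∀ d, (∀ k, k ∈ d.keys → d.get? k = some (pyMkDict k)) →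
    ∀ k, k ∈ (foldA cs d).keys → (foldA cs d).get? k = some (pyMkDict k) := by
  induction cs with
  | nil => intro d h; exact h
  | cons c t ih =>
    intro d h
    rw [foldA_cons]
    cases hc : pyCandKey c with
    | none => exact ih d h
    | some k' =>
      refine ih (d.insert k' (pyMkDict k')) ?_
      intro k hk
      rw [PySem.Dict.get?_insert]
      by_cases he : k = k'
      · subst he; simp
      · rw [if_neg he]
        rcases (PySem.Dict.mem_keys_insert d k' k (pyMkDict k')).mp hk with h1 | h1
        · exact absurd h1 he
        · exact h k h1

-- ===== VERDICT (by name: the statement is the Claim_ definition above) =====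
theorem sort_candidates_py_spec : Claim_equal_sort_candidates_py := by
  intro candidates _
  unfold Spec_sort_candidates_py sort_candidates_py sort_candidates_py_alt
  set L := candidates.filterMap pyCandKey with hL
  -- B's side
  rw [foldKeys_eq candidates []]
  simp only [List.nil_append, ← hL]
  rw [foldB_eq (PySem.List.sorted L pyKey) [] none]
  simp only [List.nil_append]
  -- A's side
  set dA := foldA candidates PySem.Dict.empty with hdA
  have hfold : candidates.foldl (fun d candidate =>
      match pyCandKey candidate with
      | some k => d.insert k (pyMkDict k)
      | none => d) PySem.Dict.empty = dA := rfl
  rw [hfold]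
  have hmemA : ∀ k, k ∈ dA.keys ↔ k ∈ L := by
    intro k
    rw [hdA, foldA_mem_keys, PySem.Dict.keys_empty]
    simp [hL]
  have hndA : dA.keys.Nodup := by
    rw [hdA]; exact foldA_nodup candidates PySem.Dict.empty (by simp)
  have hgetA : ∀ k, k ∈ dA.keys → dA.get? k = some (pyMkDict k) := by
    rw [hdA]
    exact foldA_get? candidates PySem.Dict.empty (by simp [PySem.Dict.keys_empty])
  -- the canonical result zs
  set ys := PySem.List.sorted L pyKey with hys
  have hyp : ys.Pairwise (fun a b => pyKey a ≤ pyKey b) := PySem.List.sorted_pairwise L pyKey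
  set zs := adjDedup none ys with hzs
  have hzmem : ∀ a, a ∈ zs ↔ a ∈ L := by
    intro a
    rw [hzs, adjDedup_mem ys none hyp (by intro p hp; exact absurd hp (by simp)) a]
    simp [hys, PySem.List.mem_sorted]
  have hzpw : zs.Pairwise (fun a b => pyKey a < pyKey b) := adjDedup_pairwise ys none hyp
  have hznd : zs.Nodup :=
    hzpw.imp (fun {a b} h => fun he => absurd (congrArg pyKey he) (ne_of_lt h))
  -- sorted dA.keys = zs
  have hperm : zs.Perm dA.keys := by
    rw [List.perm_ext_iff_of_nodup hznd hndA]
    intro a; rw [hzmem a, hmemA a]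
  have hsorted : PySem.List.sorted dA.keys pyKey = zs :=
    PySem.List.sorted_eq_of_perm_of_pairwise_lt dA.keys zs pyKey hperm hzpw
  rw [hsorted]
  -- map the lookups
  apply List.map_congr_left
  intro k hk
  have hkA : k ∈ dA.keys := (hmemA k).mpr ((hzmem k).mp hk)
  rw [PySem.Dict.getD_eq_get?_getD, hgetA k hkA]
  rfl
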